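-- pv_equiv track=rewrite | github.com/elazarg/thrones | plugins/pycid/pycid_plugin/convert.py | _compute_cpd_column
-- ===== SOURCE A (Python) =====
-- def _compute_cpd_column(
--     parents: list[str],
--     parent_cards: list[int],
--     assignment: dict[str, int],
-- ) -> int:
--     """Compute the column index in a CPD table given parent assignments.
--
--     Args:
--         parents: List of parent node IDs in CPD order.
--         parent_cards: Cardinalities of each parent.
--         assignment: Dict mapping parent ID to its value index.
--
--     Returns:
--         Column index in the CPD table.
--     """
--     col_idx = 0
--     multiplier = 1
--     for i in range(len(parents) - 1, -1, -1):
--         parent = parents[i]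
--         if parent in assignment:
--             col_idx += assignment[parent] * multiplier
--         multiplier *= parent_cards[i]
--     return col_idx
-- ===== SOURCE B (Python) =====
-- def _compute_cpd_column(
--     parents: list[str],
--     parent_cards: list[int],
--     assignment: dict[str, int],
-- ) -> int:
--     """Horner's method: fold cardinalities left-to-right with one accumulator."""
--     col_idx = 0
--     for parent, card in zip(parents, parent_cards):
--         col_idx = col_idx * card + assignment.get(parent, 0)
--     return col_idx
-- ===== Notes on version B (the rewrite author's own statement) =====
-- stated objective: simpler
-- what changed: B computes the mixed-radix index by Horner's method, folding parents left-to-right with a single accumulator (col = col*card + value), instead of A's right-to-left loop that maintains a separate running multiplier.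
import Mathlib
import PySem

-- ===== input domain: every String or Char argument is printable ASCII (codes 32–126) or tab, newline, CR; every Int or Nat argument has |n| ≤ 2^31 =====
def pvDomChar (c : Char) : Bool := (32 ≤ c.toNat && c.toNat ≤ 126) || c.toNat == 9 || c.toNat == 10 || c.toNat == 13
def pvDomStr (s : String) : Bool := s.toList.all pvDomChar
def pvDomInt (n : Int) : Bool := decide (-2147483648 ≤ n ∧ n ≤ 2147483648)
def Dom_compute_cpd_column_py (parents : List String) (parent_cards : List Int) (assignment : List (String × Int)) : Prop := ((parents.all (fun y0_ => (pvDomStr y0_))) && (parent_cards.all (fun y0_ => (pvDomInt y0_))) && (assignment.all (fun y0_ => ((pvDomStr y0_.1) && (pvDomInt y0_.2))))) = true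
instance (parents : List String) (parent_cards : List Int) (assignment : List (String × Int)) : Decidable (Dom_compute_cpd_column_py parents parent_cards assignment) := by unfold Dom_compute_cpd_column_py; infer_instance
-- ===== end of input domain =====

-- B replaces A's right-to-left loop with a separate running multiplier by Horner's method:
-- one left-to-right fold with a single accumulator (col = col*card + value).

-- ===== PORT A =====
def compute_cpd_column_py (parents : List String) (parent_cards : List Int) (assignment : List (String × Int)) : Int :=
  match (PySem.List.pyRange ((parents.length : Int) - 1) (-1) (-1)).foldl
    (fun st i =>
      match st with
      | none => none
      | some (col_idx, multiplier) =>
        match PySem.List.pyGet? parents i with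
        | none => none   -- IndexError on parents[i]
        | some parent =>
          match PySem.List.pyGet? parent_cards i with
          | none => none   -- IndexError on parent_cards[i]
          | some card =>
            some (if (PySem.Dict.ofList assignment).contains parent
                then col_idx + ((PySem.Dict.ofList assignment).get? parent).getD 0 * multiplier
                else col_idx,
              multiplier * card))
    (some ((0 : Int), (1 : Int))) with
  | some (col_idx, _) => col_idx
  | none => 0   -- unreachable under Pre_

-- ===== PORT B =====
def compute_cpd_column_py_alt (parents : List String) (parent_cards : List Int) (assignment : List (String × Int)) : Int :=
  (parents.zip parent_cards).foldl
    (fun col_idx pc => col_idx * pc.2 + (PySem.Dict.ofList assignment).getD pc.1 0) 0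

-- ===== PRECONDITION & SPEC =====
-- A raises IndexError at parent_cards[i] when parent_cards is shorter than parents; Pre_ excludes exactly those inputs.
def Pre_compute_cpd_column_py (parents : List String) (parent_cards : List Int) (assignment : List (String × Int)) : Prop :=
  parents.length ≤ parent_cards.length

instance (parents : List String) (parent_cards : List Int) (assignment : List (String × Int)) : Decidable (Pre_compute_cpd_column_py parents parent_cards assignment) := by unfold Pre_compute_cpd_column_py; infer_instance

def pvWitness_compute_cpd_column_py : List String × List Int × (List (String × Int)) :=
  (["a", "b"], [2, 3], [("a", 1), ("b", 2)])

def Spec_compute_cpd_column_py (parents : List String) (parent_cards : List Int) (assignment : List (String × Int)) (out : Int) : Prop := out = compute_cpd_column_py_alt parents parent_cards assignment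
instance (parents : List String) (parent_cards : List Int) (assignment : List (String × Int)) (out : Int) : Decidable (Spec_compute_cpd_column_py parents parent_cards assignment out) := by unfold Spec_compute_cpd_column_py; infer_instance

-- ===== CLAIM (what is proved, stated in full; the proofs are below) =====
def Claim_equal_compute_cpd_column_py : Prop := ∀ (parents : List String) (parent_cards : List Int) (assignment : List (String × Int)), Dom_compute_cpd_column_py parents parent_cards assignment → Pre_compute_cpd_column_py parents parent_cards assignment → Spec_compute_cpd_column_py parents parent_cards assignment (compute_cpd_column_py parents parent_cards assignment)


-- ===== LEMMAS AND PROOFS =====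

-- A's loop body on the pair (parent, card), after the membership branch is collapsed to getD.
def pvStepA (d : PySem.Dict String Int) (s : Int × Int) (pc : String × Int) : Int × Int :=
  (s.1 + d.getD pc.1 0 * s.2, s.2 * pc.2)

-- B's Horner step.
def pvStepB (d : PySem.Dict String Int) (c : Int) (pc : String × Int) : Int :=
  c * pc.2 + d.getD pc.1 0

-- Horner fold with a general initial accumulator splits off the product of cardinalities.
theorem pvHorner_shift (d : PySem.Dict String Int) (l : List (String × Int)) (c : Int) :
    l.foldl (pvStepB d) c = c * (l.map (·.2)).prod + l.foldl (pvStepB d) 0 := by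
  induction l generalizing c with
  | nil => simp
  | cons pc t ih =>
    simp only [List.foldl_cons, List.map_cons, List.prod_cons, pvStepB]
    rw [ih (c * pc.2 + d.getD pc.1 0), ih (0 * pc.2 + d.getD pc.1 0)]
    ring

-- A's reversed fold computes Horner's value together with the running product.
theorem pvRev_fold (d : PySem.Dict String Int) (l : List (String × Int)) (col mult : Int) :
    l.reverse.foldl (pvStepA d) (col, mult)
      = (col + mult * l.foldl (pvStepB d) 0, mult * (l.map (·.2)).prod) := by
  induction l generalizing col mult with
  | nil => simp
  | cons pc t ih =>
    simp only [List.reverse_cons, List.foldl_append, List.foldl_cons, List.foldl_nil,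
      List.map_cons, List.prod_cons, ih]
    simp only [pvStepA, pvStepB]
    rw [pvHorner_shift d t (0 * pc.2 + d.getD pc.1 0)]
    simp only [Prod.mk.injEq]
    constructor <;> ring

-- A's Option-threaded loop never fails when every index hits both lists, and equals the pair fold.
theorem pvStep_some (parents : List String) (parent_cards : List Int)
    (d : PySem.Dict String Int) :
    ∀ (is : List Int), (∀ i ∈ is, (PySem.List.pyGet? parents i).isSome) →
      (∀ i ∈ is, (PySem.List.pyGet? parent_cards i).isSome) → ∀ (s : Int × Int),
      is.foldl
        (fun st i =>
          match st with
          | none => none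
          | some (col_idx, multiplier) =>
            match PySem.List.pyGet? parents i with
            | none => none
            | some parent =>
              match PySem.List.pyGet? parent_cards i with
              | none => none
              | some card =>
                some (if d.contains parent then col_idx + (d.get? parent).getD 0 * multiplier else col_idx,
                  multiplier * card))
        (some s)
      = some (is.foldl
          (fun s i => pvStepA d s ((PySem.List.pyGet? parents i).getD "", (PySem.List.pyGet? parent_cards i).getD 0)) s) := by
  intro is
  induction is with
  | nil => intro _ _ s; rfl
  | cons i t ih =>
    intro hp hc s
    obtain ⟨p, hpi⟩ := Option.isSome_iff_exists.mp (hp i (by simp))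
    obtain ⟨c, hci⟩ := Option.isSome_iff_exists.mp (hc i (by simp))
    have hstate : (if d.contains p then s.1 + (d.get? p).getD 0 * s.2 else s.1, s.2 * c)
        = pvStepA d s (p, c) := by
      unfold pvStepA
      by_cases hm : d.contains p
      · simp [hm, PySem.Dict.getD_eq_get?_getD]
      · have h0 : d.getD p 0 = 0 :=
          PySem.Dict.getD_of_not_contains (d := d) (k := p) (d0 := 0) (by simpa using hm)
        rw [if_neg hm]
        simp [h0]
    simp only [List.foldl_cons, hpi, hci, Option.getD_some]
    rw [ih (fun j hj => hp j (List.mem_cons_of_mem _ hj)) (fun j hj => hc j (List.mem_cons_of_mem _ hj))]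
    rw [hstate]

-- The index range, viewed through both lists, is exactly the zip (cards at least as long as parents).
theorem pvMap_pair_eq_zip (parents : List String) (parent_cards : List Int)
    (h : parents.length ≤ parent_cards.length) :
    (PySem.List.pyRange 0 (parents.length : Int) 1).map
        (fun i => ((PySem.List.pyGet? parents i).getD "", (PySem.List.pyGet? parent_cards i).getD 0))
      = parents.zip parent_cards := by
  apply List.ext_getElem
  · simp [PySem.List.length_pyRange_one]
    omega
  · intro k h1 h2
    have hk : k < parents.length := by
      simpa [PySem.List.length_pyRange_one] using h1
    simp only [List.getElem_map, PySem.List.getElem_pyRange_one, zero_add]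
    have hgp : PySem.List.pyGet? parents ((k : Nat) : Int) = some parents[k] := by
      rw [PySem.List.pyGet?_natCast]; simp [hk]
    have hgc : PySem.List.pyGet? parent_cards ((k : Nat) : Int) = some parent_cards[k] := by
      rw [PySem.List.pyGet?_natCast]; simp [show k < parent_cards.length by omega]
    simp [hgp, hgc, List.getElem_zip]

-- ===== VERDICT (by name: the statement is the Claim_ definition above) =====
theorem compute_cpd_column_py_spec : Claim_equal_compute_cpd_column_py := by
  intro parents parent_cards assignment _ hpre
  unfold Spec_compute_cpd_column_py compute_cpd_column_py compute_cpd_column_py_alt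
  have hrange : PySem.List.pyRange ((parents.length : Int) - 1) (-1) (-1)
      = (PySem.List.pyRange 0 (parents.length : Int) 1).reverse := by
    rw [PySem.List.pyRange_neg_one_eq_reverse]
    norm_num
  have hp : ∀ i ∈ (PySem.List.pyRange 0 (parents.length : Int) 1).reverse,
      (PySem.List.pyGet? parents i).isSome := by
    intro i hi
    rw [List.mem_reverse, PySem.List.mem_pyRange_one] at hi
    have : i = ((i.toNat : Nat) : Int) := by omega
    rw [this, PySem.List.pyGet?_natCast]
    simp; omega
  have hc : ∀ i ∈ (PySem.List.pyRange 0 (parents.length : Int) 1).reverse,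
      (PySem.List.pyGet? parent_cards i).isSome := by
    intro i hi
    rw [List.mem_reverse, PySem.List.mem_pyRange_one] at hi
    have : i = ((i.toNat : Nat) : Int) := by omega
    rw [this, PySem.List.pyGet?_natCast]
    simp
    have := hpre
    unfold Pre_compute_cpd_column_py at this
    omega
  rw [hrange, pvStep_some parents parent_cards (PySem.Dict.ofList assignment) _ hp hc]
  have hfold : ((PySem.List.pyRange 0 (parents.length : Int) 1).reverse).foldl
      (fun s i => pvStepA (PySem.Dict.ofList assignment) s ((PySem.List.pyGet? parents i).getD "", (PySem.List.pyGet? parent_cards i).getD 0)) ((0 : Int), (1 : Int))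
      = (parents.zip parent_cards).reverse.foldl (pvStepA (PySem.Dict.ofList assignment)) (0, 1) := by
    rw [← List.foldl_map, List.map_reverse, pvMap_pair_eq_zip parents parent_cards hpre]
  rw [hfold, pvRev_fold]
  show (0 : Int) + 1 * (parents.zip parent_cards).foldl (pvStepB (PySem.Dict.ofList assignment)) 0 = _
  rw [zero_add, one_mul]
  rfl
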